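-- pv_equiv track=rewrite | github.com/mipayne/story-corpus-project | fixing_strings.py | modify_words1
-- ===== SOURCE A (Python) =====
-- def modify_words1(final_words):
--     cntrc_mapping_dict = {'you':["'ve","'ll","'re"], 'would':["n't"],\
--         'wo':["n't"], 'what':["'s"], 'we':["'ll"], 'was':["n't"], 'let':["'s"],\
--         'it': ["'s"], 'is': ["n't"], 'i':["'ve","'m","'ll"], 'he':["'s","'d"],\
--         'do':["n't"], 'does':["n't"], 'did':["n't"],'could':["n't"],'ca':["n't"]}
--
--     new_words = []
--     final_words_modify1 = final_words[:]
--
--     for i in range(len(final_words)):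
--         if i < (len(final_words) - 1):
--             current_word = final_words[i]
--             next_word = final_words[i+1]
--             if current_word in cntrc_mapping_dict.keys():
--                 for key in cntrc_mapping_dict:
--                     if current_word == key:
--                         for ending in cntrc_mapping_dict[key]:
--                             if next_word == ending:
--                                 new_word = current_word + next_word
--                                 new_words.append(new_word)
--                                 final_words_modify1.remove(current_word)
--                                 final_words_modify1.remove(next_word)
--             elif current_word == 'san':
--                 if next_word == 'francisco':
--                     new_word = current_word + ' ' + next_word
--                     new_words.append(new_word)
--                     final_words_modify1.remove(current_word)
--                     final_words_modify1.remove(next_word)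
--             elif current_word == 'new':
--                 if next_word == 'york':
--                     new_word = current_word + ' ' + next_word
--                     new_words.append(new_word)
--                     final_words_modify1.remove(current_word)
--                     final_words_modify1.remove(next_word)
--         else:
--             break
--
--
--     final_words_modify1.extend(new_words)
--     return final_words_modify1
-- ===== SOURCE B (Python) =====
-- def modify_words1(final_words):
--     cntrc_mapping_dict = {'you':["'ve","'ll","'re"], 'would':["n't"],
--         'wo':["n't"], 'what':["'s"], 'we':["'ll"], 'was':["n't"], 'let':["'s"],
--         'it': ["'s"], 'is': ["n't"], 'i':["'ve","'m","'ll"], 'he':["'s","'d"],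
--         'do':["n't"], 'does':["n't"], 'did':["n't"],'could':["n't"],'ca':["n't"]}
--     place = {'san': 'francisco', 'new': 'york'}
--
--     # one pass: record merged words (in order) and how many copies of each
--     # word the merges consume
--     merged = []
--     removed = {}
--     for i in range(len(final_words) - 1):
--         w, v = final_words[i], final_words[i + 1]
--         if w in cntrc_mapping_dict:
--             if v in cntrc_mapping_dict[w]:
--                 new_word = w + v
--             else:
--                 continue
--         elif place.get(w) == v:
--             new_word = w + ' ' + v
--         else:
--             continue
--         merged.append(new_word)
--         removed[w] = removed.get(w, 0) + 1
--         removed[v] = removed.get(v, 0) + 1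
--
--     # rebuild, skipping the first removed[w] occurrences of each word w
--     out = []
--     for w in final_words:
--         if removed.get(w, 0) > 0:
--             removed[w] -= 1
--         else:
--             out.append(w)
--     out.extend(merged)
--     return out
-- ===== Notes on version B (the rewrite author's own statement) =====
-- stated objective: alternative
-- what changed: Instead of scanning with repeated list.remove calls (each a linear scan) on a shrinking copy, B detects the matched pairs in one pass over the original list while counting how many copies of each word the merges consume, then rebuilds the result in a second pass skipping the first k occurrences of each consumed word.
import Mathlib
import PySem

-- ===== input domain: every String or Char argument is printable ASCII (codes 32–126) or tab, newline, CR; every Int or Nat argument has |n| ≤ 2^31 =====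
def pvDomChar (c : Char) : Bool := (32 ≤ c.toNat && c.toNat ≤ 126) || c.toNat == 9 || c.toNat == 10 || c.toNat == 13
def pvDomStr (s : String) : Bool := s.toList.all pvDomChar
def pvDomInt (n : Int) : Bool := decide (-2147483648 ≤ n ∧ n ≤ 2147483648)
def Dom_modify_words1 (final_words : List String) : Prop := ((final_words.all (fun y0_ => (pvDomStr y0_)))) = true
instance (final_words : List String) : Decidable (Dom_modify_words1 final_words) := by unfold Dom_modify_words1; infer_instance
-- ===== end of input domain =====

-- B replaces A's repeated list.remove scans by one match-counting pass and one counted rebuild pass (alternative algorithm, same return value; A never raises: every .remove target is present, see `removeA`).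

-- ===== PORT A =====
-- the contraction dict, in source insertion order
def cdictA : PySem.Dict String (List String) := PySem.Dict.ofList
  [("you", ["'ve","'ll","'re"]), ("would", ["n't"]), ("wo", ["n't"]), ("what", ["'s"]),
   ("we", ["'ll"]), ("was", ["n't"]), ("let", ["'s"]), ("it", ["'s"]), ("is", ["n't"]),
   ("i", ["'ve","'m","'ll"]), ("he", ["'s","'d"]), ("do", ["n't"]), ("does", ["n't"]),
   ("did", ["n't"]), ("could", ["n't"]), ("ca", ["n't"])]

-- list.remove(v): Python raises ValueError when v is absent, but A only ever removes
-- words it has just read from the list, so the `none` branch is unreachable (totalized with getD).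
def removeA (l : List String) (v : String) : List String := (PySem.List.remove? l v).getD l

-- the body of `for i in range(len(final_words))` with its `else: break`
def aLoop (fw : List String) (i : Nat) (nw m1 : List String) : List String :=
  if _hi : i < fw.length then
    if h : i < fw.length - 1 then
      let current := PySem.List.pyGetD fw (i : Int) ""
      let next := PySem.List.pyGetD fw ((i : Int) + 1) ""
      let st :=
        if cdictA.contains current then
          cdictA.items.foldl (fun st kv =>
            if current == kv.1 then
              kv.2.foldl (fun st ending =>
                if next == ending then
                  (st.1 ++ [current ++ next], removeA (removeA st.2 current) next)
                else st) st
            else st) (nw, m1)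
        else if current == "san" then
          (if next == "francisco" then
            (nw ++ [current ++ " " ++ next], removeA (removeA m1 current) next)
          else (nw, m1))
        else if current == "new" then
          (if next == "york" then
            (nw ++ [current ++ " " ++ next], removeA (removeA m1 current) next)
          else (nw, m1))
        else (nw, m1)
      aLoop fw (i + 1) st.1 st.2
    else m1 ++ nw   -- break, then final_words_modify1.extend(new_words)
  else m1 ++ nw
termination_by fw.length - i

def modify_words1 (final_words : List String) : List String :=
  aLoop final_words 0 [] final_words

-- ===== PORT B =====
def cdictB : PySem.Dict String (List String) := PySem.Dict.ofList
  [("you", ["'ve","'ll","'re"]), ("would", ["n't"]), ("wo", ["n't"]), ("what", ["'s"]),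
   ("we", ["'ll"]), ("was", ["n't"]), ("let", ["'s"]), ("it", ["'s"]), ("is", ["n't"]),
   ("i", ["'ve","'m","'ll"]), ("he", ["'s","'d"]), ("do", ["n't"]), ("does", ["n't"]),
   ("did", ["n't"]), ("could", ["n't"]), ("ca", ["n't"])]

def placeB : PySem.Dict String String := PySem.Dict.ofList [("san", "francisco"), ("new", "york")]

-- one step of the match-detecting pass (the `continue`s expressed as an Option)
def bStep (fw : List String) (st : List String × PySem.Dict String Int) (i : Int) :
    List String × PySem.Dict String Int :=
  let w := PySem.List.pyGetD fw i ""
  let v := PySem.List.pyGetD fw (i + 1) ""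
  let new? : Option String :=
    if cdictB.contains w then
      (if (cdictB.getD w []).contains v then some (w ++ v) else none)
    else if placeB.get? w == some v then some (w ++ " " ++ v)
    else none
  match new? with
  | none => st
  | some new_word =>
    let d := st.2.insert w (st.2.getD w 0 + 1)
    (st.1 ++ [new_word], d.insert v (d.getD v 0 + 1))

-- one step of the rebuild pass
def bRebuildStep (st : PySem.Dict String Int × List String) (w : String) :
    PySem.Dict String Int × List String :=
  if st.1.getD w 0 > 0 then (st.1.insert w (st.1.getD w 0 - 1), st.2) else (st.1, st.2 ++ [w])

def modify_words1_alt (final_words : List String) : List String :=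
  let p := (PySem.List.pyRange 0 ((final_words.length : Int) - 1) 1).foldl
             (bStep final_words) ([], PySem.Dict.empty)
  let q := final_words.foldl bRebuildStep (p.2, [])
  q.2 ++ p.1

-- ===== PRECONDITION & SPEC =====
def Spec_modify_words1 (final_words : List String) (out : List String) : Prop := out = modify_words1_alt final_words
instance (final_words : List String) (out : List String) : Decidable (Spec_modify_words1 final_words out) := by unfold Spec_modify_words1; infer_instance

-- ===== CLAIM (what is proved, stated in full; the proofs are below) =====
def Claim_equal_modify_words1 : Prop := ∀ (final_words : List String), Dom_modify_words1 final_words → Spec_modify_words1 final_words (modify_words1 final_words)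

-- ===== LEMMAS AND PROOFS =====

-- canonical action of one index: the merged word, if the pair (w, v) matches
def cAct (w v : String) : Option String :=
  match cdictA.get? w with
  | some es => if es.contains v then some (w ++ v) else none
  | none =>
    if w = "san" then (if v = "francisco" then some (w ++ " " ++ v) else none)
    else if w = "new" then (if v = "york" then some (w ++ " " ++ v) else none)
    else none

-- the matched pairs from index i on: (current, next, merged word)
def pairsFrom (fw : List String) (i : Nat) : List (String × String × String) :=
  if _h : i + 1 < fw.length then
    let w := fw.getD i ""
    let v := fw.getD (i + 1) ""
    match cAct w v with
    | some m => (w, v, m) :: pairsFrom fw (i + 1)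
    | none => pairsFrom fw (i + 1)
  else []
termination_by fw.length - i

def wordsOf (ps : List (String × String × String)) : List String :=
  ps.flatMap (fun p => [p.1, p.2.1])

def mergedOf (ps : List (String × String × String)) : List String := ps.map (·.2.2)

def removeList (l : List String) (rs : List String) : List String := rs.foldl removeA l

-- keep each word w of l except the first (c w) occurrences
def skipCount (l : List String) (c : String → Int) : List String :=
  match l with
  | [] => []
  | w :: ws =>
    if c w > 0 then skipCount ws (fun x => if x = w then c x - 1 else c x)
    else w :: skipCount ws c

-- basic facts about removeA
theorem removeA_cons_self (l : List String) (v : String) : removeA (v :: l) v = l := by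
  simp [removeA]

theorem removeA_cons_ne (a v : String) (l : List String) (h : a ≠ v) :
    removeA (a :: l) v = a :: removeA l v := by
  rw [removeA, PySem.List.remove?_cons_of_ne _ h]
  cases hr : PySem.List.remove? l v <;> simp [removeA, hr]

-- a fold that acts only when p holds, over a list where p never holds, is the identity
theorem foldl_if_none {σ α : Type} (p : α → Bool) (g : α → σ → σ) (l : List α)
    (hl : ∀ e ∈ l, p e = false) (s : σ) :
    l.foldl (fun s e => if p e then g e s else s) s = s := by
  induction l generalizing s with
  | nil => rfl
  | cons a l ih =>
    have h := hl a List.mem_cons_self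
    simp only [List.foldl_cons, h, Bool.false_eq_true, if_false]
    exact ih (fun e he => hl e (List.mem_cons_of_mem _ he)) s

-- a fold that applies f when p holds, over a list where p holds at most once
theorem foldl_if_single {σ α : Type} (p : α → Bool) (f : σ → σ) (l : List α)
    (hl : l.countP p ≤ 1) (s : σ) :
    l.foldl (fun s e => if p e then f s else s) s = if l.any p then f s else s := by
  induction l generalizing s with
  | nil => rfl
  | cons a l ih =>
    have hc : List.countP p (a :: l) = List.countP p l + if p a then 1 else 0 := by
      rw [List.countP_cons]
    by_cases hap : p a = true
    · have h0 : l.countP p = 0 := by rw [hc, if_pos hap] at hl; omega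
      have hnone : ∀ e ∈ l, p e = false := by
        intro e he
        by_contra hcon
        have : 0 < l.countP p := List.countP_pos_iff.mpr ⟨e, he, by simpa using hcon⟩
        omega
      simp [List.foldl_cons, hap, foldl_if_none p (fun _ => f) l hnone]
    · have hap' : p a = false := by simpa using hap
      have hle : l.countP p ≤ 1 := by omega
      simp [List.foldl_cons, hap', ih hle]

-- fold over a dict's items where at most the (unique) matching key acts
theorem foldl_items_key {σ : Type} (l : List (String × List String))
    (hn : (l.map Prod.fst).Nodup) (w : String) (g : List String → σ → σ) (s : σ) :
    l.foldl (fun s kv => if w == kv.1 then g kv.2 s else s) s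
      = match (PySem.Dict.mk l).get? w with
        | some es => g es s
        | none => s := by
  induction l generalizing s with
  | nil => simp [PySem.Dict.get?]
  | cons kv l ih =>
    obtain ⟨k, es⟩ := kv
    rw [PySem.Dict.get?_mk_cons]
    have hn' : (l.map Prod.fst).Nodup := (List.nodup_cons.mp (by simpa using hn)).2
    by_cases hk : k = w
    · subst hk
      have hne : k ∉ l.map Prod.fst := (List.nodup_cons.mp (by simpa using hn)).1
      have hrest : ∀ p ∈ l, (k == p.1) = false := by
        intro p hp
        simp only [beq_eq_false_iff_ne, ne_eq]
        intro hEq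
        exact hne (hEq ▸ List.mem_map_of_mem hp)
      simp only [List.foldl_cons, BEq.rfl, if_true]
      exact foldl_if_none (fun kv : String × List String => k == kv.1)
        (fun kv s => g kv.2 s) l hrest (g es s)
    · have h1 : (w == k) = false := by simpa using Ne.symm hk
      have h2 : (k == w) = false := by simpa using hk
      simp only [List.foldl_cons, h1, h2, Bool.false_eq_true, if_false]
      exact ih hn' s

-- the dict literal and its shape facts
def cLit : List (String × List String) :=
  [("you", ["'ve","'ll","'re"]), ("would", ["n't"]), ("wo", ["n't"]), ("what", ["'s"]),
   ("we", ["'ll"]), ("was", ["n't"]), ("let", ["'s"]), ("it", ["'s"]), ("is", ["n't"]),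
   ("i", ["'ve","'m","'ll"]), ("he", ["'s","'d"]), ("do", ["n't"]), ("does", ["n't"]),
   ("did", ["n't"]), ("could", ["n't"]), ("ca", ["n't"])]

theorem cdictA_mk : cdictA = PySem.Dict.mk cLit := by decide

theorem cLit_keys_nodup : (cLit.map Prod.fst).Nodup := by decide

theorem cLit_vals_nodup : ∀ kv ∈ cLit, kv.2.Nodup := by decide

-- A's per-index body equals the canonical action
theorem stepA (current next : String) (nw m1 : List String) :
    (if cdictA.contains current then
       cdictA.items.foldl (fun st kv =>
         if current == kv.1 then
           kv.2.foldl (fun st ending =>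
             if next == ending then
               (st.1 ++ [current ++ next], removeA (removeA st.2 current) next)
             else st) st
         else st) (nw, m1)
     else if current == "san" then
       (if next == "francisco" then
         (nw ++ [current ++ " " ++ next], removeA (removeA m1 current) next)
       else (nw, m1))
     else if current == "new" then
       (if next == "york" then
         (nw ++ [current ++ " " ++ next], removeA (removeA m1 current) next)
       else (nw, m1))
     else (nw, m1))
    = match cAct current next with
      | some m => (nw ++ [m], removeA (removeA m1 current) next)
      | none => (nw, m1) := by
  cases hg : cdictA.get? current with
  | some es =>
    have hcont : cdictA.contains current = true := by
      rw [PySem.Dict.contains_eq_isSome_get?, hg]; rfl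
    rw [if_pos hcont, show cdictA.items = cLit from by rw [cdictA_mk]]
    rw [foldl_items_key cLit cLit_keys_nodup current
      (fun es st => es.foldl (fun st ending =>
        if next == ending then
          (st.1 ++ [current ++ next], removeA (removeA st.2 current) next)
        else st) st) (nw, m1)]
    rw [← cdictA_mk, hg]
    dsimp only
    have hmem : (current, es) ∈ cLit := by
      have := PySem.Dict.mem_items_of_get?_eq_some cdictA hg
      rwa [show cdictA.items = cLit from by rw [cdictA_mk]] at this
    have hnd : es.Nodup := cLit_vals_nodup (current, es) hmem
    have hcnt : es.countP (fun e => next == e) ≤ 1 := by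
      have heq : es.countP (fun e => next == e) = es.count next := by
        rw [List.count]
        congr 1
        funext e
        exact Bool.beq_comm
      rw [heq]
      exact List.nodup_iff_count_le_one.mp hnd next
    rw [foldl_if_single (fun e => next == e)
      (fun st => (st.1 ++ [current ++ next], removeA (removeA st.2 current) next)) es hcnt]
    rw [List.any_beq]
    unfold cAct
    rw [hg]
    by_cases hm : next ∈ es <;> simp [hm]
  | none =>
    have hcont : cdictA.contains current = false := by
      rw [PySem.Dict.contains_eq_isSome_get?, hg]; rfl
    rw [if_neg (by simp [hcont])]
    unfold cAct
    rw [hg]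
    by_cases h1 : current = "san"
    · subst h1
      by_cases h2 : next = "francisco" <;> simp [h2]
    · by_cases h3 : current = "new"
      · subst h3
        by_cases h2 : next = "york" <;> simp [h2, h1]
      · simp [h1, h3]

-- B's pair test equals the canonical action
theorem stepB (w v : String) :
    (if cdictB.contains w then
       (if (cdictB.getD w []).contains v then some (w ++ v) else none)
     else if placeB.get? w == some v then some (w ++ " " ++ v)
     else none)
    = cAct w v := by
  rw [show cdictB = cdictA from rfl]
  cases hg : cdictA.get? w with
  | some es =>
    have hcont : cdictA.contains w = true := by
      rw [PySem.Dict.contains_eq_isSome_get?, hg]; rfl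
    rw [if_pos hcont, PySem.Dict.getD_eq_get?_getD, hg]
    unfold cAct
    rw [hg]
    simp
  | none =>
    have hcont : cdictA.contains w = false := by
      rw [PySem.Dict.contains_eq_isSome_get?, hg]; rfl
    rw [if_neg (by simp [hcont])]
    unfold cAct
    rw [hg]
    rw [show placeB = PySem.Dict.mk [("san", "francisco"), ("new", "york")] from by decide]
    rw [PySem.Dict.get?_mk_cons, PySem.Dict.get?_mk_cons]
    by_cases h1 : w = "san"
    · subst h1
      by_cases h2 : v = "francisco"
      · subst h2; simp
      · have hb : ("francisco" == v) = false := by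
          simp only [beq_eq_false_iff_ne, ne_eq]
          exact fun h => h2 h.symm
        simp [hb, h2]
    · have e1 : ("san" == w) = false := by
        simp only [beq_eq_false_iff_ne, ne_eq]
        exact fun h => h1 h.symm
      by_cases h3 : w = "new"
      · subst h3
        by_cases h2 : v = "york"
        · subst h2; simp [e1]
        · have hb : ("york" == v) = false := by
            simp only [beq_eq_false_iff_ne, ne_eq]
            exact fun h => h2 h.symm
          simp [e1, hb, h2, h1]
      · have e3 : ("new" == w) = false := by
          simp only [beq_eq_false_iff_ne, ne_eq]
          exact fun h => h3 h.symm
        simp [e1, e3, h1, h3, PySem.Dict.get?]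

theorem wordsOf_cons (w v m : String) (ps : List (String × String × String)) :
    wordsOf ((w, v, m) :: ps) = w :: v :: wordsOf ps := by
  simp [wordsOf]

theorem mergedOf_cons (w v m : String) (ps : List (String × String × String)) :
    mergedOf ((w, v, m) :: ps) = m :: mergedOf ps := by
  simp [mergedOf]

theorem removeList_cons2 (m1 : List String) (w v : String) (rs : List String) :
    removeList m1 (w :: v :: rs) = removeList (removeA (removeA m1 w) v) rs := rfl

-- A's loop, characterised by the matched pairs from index i on
theorem aLoop_eq (fw : List String) :
    ∀ (k i : Nat) (nw m1 : List String), fw.length - i ≤ k →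
    aLoop fw i nw m1
      = removeList m1 (wordsOf (pairsFrom fw i)) ++ (nw ++ mergedOf (pairsFrom fw i)) := by
  intro k
  induction k with
  | zero =>
    intro i nw m1 hk
    rw [aLoop, pairsFrom]
    have h1 : ¬ i < fw.length := by omega
    have h2 : ¬ i + 1 < fw.length := by omega
    rw [dif_neg h1, dif_neg h2]
    simp [removeList, wordsOf, mergedOf]
  | succ k ih =>
    intro i nw m1 hk
    rw [aLoop, pairsFrom]
    by_cases hi : i < fw.length
    · by_cases h : i < fw.length - 1
      · have h2 : i + 1 < fw.length := by omega
        rw [dif_pos hi, dif_pos h, dif_pos h2]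
        have hnext : ((i : Int) + 1) = ((i + 1 : Nat) : Int) := by push_cast; ring
        simp only [hnext, PySem.List.pyGetD_natCast]
        rw [stepA (fw.getD i "") (fw.getD (i + 1) "") nw m1]
        cases hact : cAct (fw.getD i "") (fw.getD (i + 1) "") with
        | some m =>
          rw [ih (i + 1) (nw ++ [m]) (removeA (removeA m1 (fw.getD i "")) (fw.getD (i + 1) ""))
            (by omega)]
          rw [wordsOf_cons, mergedOf_cons, removeList_cons2]
          simp
        | none =>
          exact ih (i + 1) nw m1 (by omega)
      · have h2 : ¬ i + 1 < fw.length := by omega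
        rw [dif_neg h, dif_neg h2]
        simp [removeList, wordsOf, mergedOf]
    · have h2 : ¬ i + 1 < fw.length := by omega
      rw [dif_neg hi, dif_neg h2]
      simp [removeList, wordsOf, mergedOf]

-- a counter that is nowhere positive skips nothing
theorem skipCount_nonpos (l : List String) (c : String → Int) (h : ∀ x, c x ≤ 0) :
    skipCount l c = l := by
  induction l generalizing c with
  | nil => rfl
  | cons w ws ih =>
    rw [skipCount]
    rw [if_neg (by have := h w; omega)]
    rw [ih c h]

-- bumping the counter of w is the same as first erasing w's first occurrence
theorem skip_erase (l : List String) :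
    ∀ (c : String → Int) (w : String), (∀ x, 0 ≤ c x) →
    skipCount l (fun x => if x = w then c x + 1 else c x) = skipCount (removeA l w) c := by
  induction l with
  | nil => intro c w _; rfl
  | cons a l ih =>
    intro c w hc
    by_cases haw : a = w
    · subst haw
      rw [removeA_cons_self, skipCount]
      rw [if_pos (by simp; have := hc a; omega)]
      congr 1
      funext x
      by_cases hx : x = a <;> simp [hx]
    · rw [removeA_cons_ne a w l haw, skipCount, skipCount]
      have hca : (if a = w then c a + 1 else c a) = c a := by simp [haw]
      rw [hca]
      by_cases hpos : c a > 0
      · rw [if_pos hpos, if_pos hpos]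
        have heq : (fun x => if x = a then (if x = w then c x + 1 else c x) - 1
              else if x = w then c x + 1 else c x)
            = (fun x => if x = w then (fun y => if y = a then c y - 1 else c y) x + 1
              else (fun y => if y = a then c y - 1 else c y) x) := by
          funext x
          by_cases hx : x = a
          · subst hx; simp [haw]
          · by_cases hxw : x = w <;> simp [hx, hxw, Ne.symm haw]
        rw [heq, ih (fun y => if y = a then c y - 1 else c y) w
          (by intro y; by_cases hy : y = a <;> simp [hy] <;> [omega; exact hc y])]
      · rw [if_neg hpos, if_neg hpos]
        rw [ih c w hc]

-- sequential first-occurrence removal = skipping the first (count) occurrences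
theorem removeList_eq_skipCount (rs : List String) :
    ∀ (l : List String), removeList l rs = skipCount l (fun w => (rs.count w : Int)) := by
  induction rs with
  | nil =>
    intro l
    rw [skipCount_nonpos l _ (by intro x; simp)]
    rfl
  | cons r rs ih =>
    intro l
    have h1 : removeList l (r :: rs) = removeList (removeA l r) rs := rfl
    rw [h1, ih (removeA l r)]
    rw [← skip_erase l (fun w => (rs.count w : Int)) r (by intro x; positivity)]
    congr 1
    funext x
    by_cases hx : x = r
    · subst hx
      simp [List.count_cons_self]
    · have hrx : ¬ r = x := fun h => hx h.symm
      have hcc : (r :: rs).count x = rs.count x := by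
        rw [List.count_cons]
        simp [hrx]
      rw [if_neg hx, hcc]

-- B's first pass, characterised by the matched pairs from index i on
theorem bFold_eq (fw : List String) :
    ∀ (k i : Nat) (M : List String) (d : PySem.Dict String Int), fw.length - i ≤ k →
    (PySem.List.pyRange (i : Int) ((fw.length : Int) - 1) 1).foldl (bStep fw) (M, d)
      = (M ++ mergedOf (pairsFrom fw i),
         (wordsOf (pairsFrom fw i)).foldl (fun d x => d.insert x (d.getD x 0 + 1)) d) := by
  intro k
  induction k with
  | zero =>
    intro i M d hk
    rw [PySem.List.pyRange_one_eq_nil (by omega), pairsFrom,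
      dif_neg (by omega)]
    simp [wordsOf, mergedOf]
  | succ k ih =>
    intro i M d hk
    by_cases h2 : i + 1 < fw.length
    · have hnext : ((i : Int) + 1) = ((i + 1 : Nat) : Int) := by push_cast; ring
      have hb : bStep fw (M, d) (i : Int)
          = (match cAct (fw.getD i "") (fw.getD (i + 1) "") with
             | none => (M, d)
             | some new_word =>
               (M ++ [new_word],
                (d.insert (fw.getD i "") (d.getD (fw.getD i "") 0 + 1)).insert
                  (fw.getD (i + 1) "")
                  ((d.insert (fw.getD i "") (d.getD (fw.getD i "") 0 + 1)).getD
                    (fw.getD (i + 1) "") 0 + 1))) := by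
        rw [bStep]
        simp only [hnext, PySem.List.pyGetD_natCast]
        rw [stepB (fw.getD i "") (fw.getD (i + 1) "")]
      rw [PySem.List.pyRange_one_cons (by omega), List.foldl_cons,
        pairsFrom, dif_pos h2, hb]
      cases hact : cAct (fw.getD i "") (fw.getD (i + 1) "") with
      | some m =>
        simp only [hact]
        rw [hnext, ih (i + 1) (M ++ [m]) _ (by omega)]
        rw [wordsOf_cons, mergedOf_cons]
        simp [List.foldl_cons]
      | none =>
        simp only [hact]
        rw [hnext, ih (i + 1) M d (by omega)]
    · rw [PySem.List.pyRange_one_eq_nil (by omega), pairsFrom,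
        dif_neg h2]
      simp [wordsOf, mergedOf]

-- B's rebuild pass is skipCount
theorem rebuild_eq (l : List String) :
    ∀ (d : PySem.Dict String Int) (out : List String),
    (l.foldl bRebuildStep (d, out)).2 = out ++ skipCount l (fun w => d.getD w 0) := by
  induction l with
  | nil => intro d out; simp [skipCount]
  | cons w ws ih =>
    intro d out
    rw [List.foldl_cons, skipCount]
    by_cases hp : d.getD w 0 > 0
    · rw [if_pos hp,
        show bRebuildStep (d, out) w = (d.insert w (d.getD w 0 - 1), out) from by
          simp [bRebuildStep, hp]]
      rw [ih]
      congr 1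
      congr 1
      funext x
      rw [PySem.Dict.getD_insert]
      by_cases hx : x = w <;> simp [hx]
    · rw [if_neg hp,
        show bRebuildStep (d, out) w = (d, out ++ [w]) from by simp [bRebuildStep, hp]]
      rw [ih]
      simp

-- ===== VERDICT =====
theorem modify_words1_spec : Claim_equal_modify_words1 := by
  intro fw _
  unfold Spec_modify_words1
  rw [show modify_words1 fw = aLoop fw 0 [] fw from rfl]
  rw [aLoop_eq fw fw.length 0 [] fw (by omega)]
  rw [modify_words1_alt]
  rw [show (0 : Int) = ((0 : Nat) : Int) from by simp]
  rw [bFold_eq fw fw.length 0 [] PySem.Dict.empty (by omega)]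
  rw [rebuild_eq fw]
  have hcnt : (fun w => (List.foldl (fun d x => d.insert x (d.getD x 0 + 1))
        PySem.Dict.empty (wordsOf (pairsFrom fw 0))).getD w 0)
      = (fun w => (((wordsOf (pairsFrom fw 0)).count w : Int))) := by
    funext w
    rw [PySem.Dict.getD_foldl_insert_add_one, PySem.Dict.getD_empty]
    ring
  rw [hcnt, removeList_eq_skipCount]
  simp
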